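-- pv_equiv track=rewrite | github.com/yu2799/AtCoder | abc/200/190/188E.py | bfs
-- ===== SOURCE A (Python) =====
-- from collections import deque
--
-- def bfs(graph, start, a, visited):
--     next_visit = deque([start])
--     res = -2 * 10**9
--     while next_visit:
--         cur = next_visit.popleft()
--         for i in graph[cur]:
--             if res < a[i][0]:
--                 res = a[i][0]
--             if i in visited:
--                 continue
--             visited.add(i)
--             next_visit.append(i)
--     return res
-- ===== SOURCE B (Python) =====
-- from collections import deque
--
-- # Two-pass re-implementation: pass 1 does the same BFS but only computes
-- # reachability (mutating `visited` exactly like A: start never added, each new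
-- # neighbor added once); pass 2 is a separate max-reduction over the scanned
-- # nodes' adjacency rows.  Like A, this mutates `visited` in place.
-- def bfs(graph, start, a, visited):
--     # pass 1: reachability only
--     order = [start]
--     next_visit = deque([start])
--     while next_visit:
--         cur = next_visit.popleft()
--         for i in graph[cur]:
--             if i not in visited:
--                 visited.add(i)
--                 next_visit.append(i)
--                 order.append(i)
--     # pass 2: max-reduction over every scanned node's row
--     res = -2 * 10**9
--     for node in order:
--         for i in graph[node]:
--             if a[i][0] > res:
--                 res = a[i][0]
--     return res
-- ===== Notes on version B (the rewrite author's own statement) =====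
-- stated objective: alternative
-- what changed: A fuses max-tracking into the BFS inner loop; B decomposes it into two passes: a reachability-only BFS that records the scanned nodes (mutating visited exactly like A), then a separate max-reduction over every scanned node's adjacency row, exact because max is order-independent.
import Mathlib
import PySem

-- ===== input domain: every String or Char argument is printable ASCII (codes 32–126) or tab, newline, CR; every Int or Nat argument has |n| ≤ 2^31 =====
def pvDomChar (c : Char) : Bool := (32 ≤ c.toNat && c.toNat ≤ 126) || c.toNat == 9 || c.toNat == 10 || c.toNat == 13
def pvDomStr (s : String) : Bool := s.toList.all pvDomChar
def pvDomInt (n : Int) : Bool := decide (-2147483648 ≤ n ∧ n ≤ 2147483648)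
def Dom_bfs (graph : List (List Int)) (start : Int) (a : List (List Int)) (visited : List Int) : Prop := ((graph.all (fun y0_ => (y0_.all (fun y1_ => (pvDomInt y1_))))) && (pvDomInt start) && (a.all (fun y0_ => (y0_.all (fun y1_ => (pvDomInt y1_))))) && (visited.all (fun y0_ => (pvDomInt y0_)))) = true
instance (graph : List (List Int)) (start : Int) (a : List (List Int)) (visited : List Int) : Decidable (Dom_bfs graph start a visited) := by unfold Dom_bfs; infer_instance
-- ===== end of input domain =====

-- B replaces A's fused BFS+max loop by two passes (reachability BFS, then a separate
-- max-reduction over the scanned rows); equivalence is about the return value (both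
-- Pythons mutate `visited` identically).

-- ===== PORT A =====
-- a[i][0] (total form; exact under Pre_, which puts the indices in range)
def pvVal (a : List (List Int)) (i : Int) : Int :=
  PySem.List.pyGetD (PySem.List.pyGetD a i []) 0 0

-- body of A's inner `for i in graph[cur]` loop; state = (res, visited, queue)
def pvStepA (a : List (List Int)) (st : Int × PySem.Set Int × List Int) (i : Int) :
    Int × PySem.Set Int × List Int :=
  let res := if st.1 < pvVal a i then pvVal a i else st.1
  if PySem.Set.contains st.2.1 i then (res, st.2.1, st.2.2)
  else (res, PySem.Set.add st.2.1 i, st.2.2 ++ [i])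

-- A's `while next_visit` loop (the fuel only makes the same computation total:
-- the lemmas below show this fuel is never exhausted before the queue empties)
def pvLoopA (graph a : List (List Int)) :
    Nat → List Int → PySem.Set Int → Int → Int
  | 0, _, _, res => res
  | _ + 1, [], _, res => res
  | fuel + 1, cur :: q, vis, res =>
      let st := (PySem.List.pyGetD graph cur []).foldl (pvStepA a) (res, vis, q)
      pvLoopA graph a fuel st.2.2 st.2.1 st.1

def bfs (graph : List (List Int)) (start : Int) (a : List (List Int)) (visited : List Int) : Int :=
  pvLoopA graph a (graph.flatten.length + 1) [start] visited (-2 * 10 ^ 9)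

-- ===== PORT B =====
-- body of pass 1's inner loop; state = (visited, queue, order)
def pvStepB (st : PySem.Set Int × List Int × List Int) (i : Int) :
    PySem.Set Int × List Int × List Int :=
  if PySem.Set.contains st.1 i then st
  else (PySem.Set.add st.1 i, st.2.1 ++ [i], st.2.2 ++ [i])

-- pass 1: the reachability BFS, returning the list `order` of scanned nodes
def pvPass1 (graph : List (List Int)) :
    Nat → List Int → PySem.Set Int → List Int → List Int
  | 0, _, _, order => order
  | _ + 1, [], _, order => order
  | fuel + 1, cur :: q, vis, order =>
      let st := (PySem.List.pyGetD graph cur []).foldl pvStepB (vis, q, order)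
      pvPass1 graph fuel st.2.1 st.1 st.2.2

-- pass 2's inner loop: fold a's values over one node's row
def pvRowMax (graph a : List (List Int)) (res node : Int) : Int :=
  (PySem.List.pyGetD graph node []).foldl
    (fun r i => if pvVal a i > r then pvVal a i else r) res

def bfs_alt (graph : List (List Int)) (start : Int) (a : List (List Int)) (visited : List Int) : Int :=
  let order := pvPass1 graph (graph.flatten.length + 1) [start] visited [start]
  order.foldl (pvRowMax graph a) (-2 * 10 ^ 9)

-- ===== PRECONDITION & SPEC =====
-- helpers for Pre_: the set of nodes A ever scans, as an iterated saturation closure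
-- (monotone set growth, saturated after flatten-length steps; not the ports' BFS).
-- pvGrow adds, for every in-range node x already in the set, the entries of graph[x]
-- that are not blocked by the initial `visited` set.
def pvGrow (graph : List (List Int)) (visited : PySem.Set Int) (S : List Int) : List Int :=
  S.foldl (fun acc x =>
    if PySem.Raise.InRange graph.length x then
      (PySem.List.pyGetD graph x []).foldl
        (fun acc2 y => if y ∈ visited ∨ y ∈ acc2 then acc2 else acc2 ++ [y]) acc
    else acc) S

def pvScan (graph : List (List Int)) (start : Int) (visited : PySem.Set Int) : List Int :=
  (pvGrow graph visited)^[graph.flatten.length + 1] [start]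

-- Pre_ holds exactly when A returns normally: every scanned node must be a valid index
-- of graph (else graph[cur] raises IndexError) and every entry of its row a valid index
-- of a with a nonempty row (else a[i][0] raises IndexError).
def Pre_bfs (graph : List (List Int)) (start : Int) (a : List (List Int)) (visited : List Int) : Prop :=
  ∀ y ∈ pvScan graph start visited,
    PySem.Raise.InRange graph.length y ∧
    ∀ i ∈ PySem.List.pyGetD graph y [],
      PySem.Raise.InRange a.length i ∧
      PySem.List.pyGetD a i [] ≠ []
instance (graph : List (List Int)) (start : Int) (a : List (List Int)) (visited : List Int) : Decidable (Pre_bfs graph start a visited) := by unfold Pre_bfs; infer_instance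

def pvWitness_bfs : List (List Int) × Int × List (List Int) × List Int :=
  ([[1], [0]], 0, [[3], [7]], [])

def Spec_bfs (graph : List (List Int)) (start : Int) (a : List (List Int)) (visited : List Int) (out : Int) : Prop := out = bfs_alt graph start a visited
instance (graph : List (List Int)) (start : Int) (a : List (List Int)) (visited : List Int) (out : Int) : Decidable (Spec_bfs graph start a visited out) := by unfold Spec_bfs; infer_instance

-- ===== CLAIM (what is proved, stated in full; the proofs are below) =====
def Claim_equal_bfs : Prop := ∀ (graph : List (List Int)) (start : Int) (a : List (List Int)) (visited : List Int), Dom_bfs graph start a visited → Pre_bfs graph start a visited → Spec_bfs graph start a visited (bfs graph start a visited)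

-- ===== LEMMAS AND PROOFS =====

-- visited set after scanning one row
def pvVisF (vis : PySem.Set Int) (row : List Int) : PySem.Set Int :=
  row.foldl PySem.Set.add vis

-- the new nodes appended (to queue / order / visited) while scanning one row
def pvAdds (vis : PySem.Set Int) : List Int → List Int
  | [] => []
  | i :: rest =>
      if PySem.Set.contains vis i then pvAdds vis rest
      else i :: pvAdds (PySem.Set.add vis i) rest

theorem pvInnerA (a : List (List Int)) (row : List Int) :
    ∀ (res : Int) (vis : PySem.Set Int) (q : List Int),
      row.foldl (pvStepA a) (res, vis, q) =
        (row.foldl (fun r i => if r < pvVal a i then pvVal a i else r) res,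
         pvVisF vis row, q ++ pvAdds vis row) := by
  induction row with
  | nil => intro res vis q; simp [pvVisF, pvAdds]
  | cons i rest ih =>
      intro res vis q
      by_cases h : i ∈ vis
      · simp [pvStepA, pvVisF, pvAdds, h, PySem.Set.add_of_mem, ih]
      · simp [pvStepA, pvVisF, pvAdds, h, ih, List.append_assoc]

theorem pvInnerB (row : List Int) :
    ∀ (vis : PySem.Set Int) (q ord : List Int),
      row.foldl pvStepB (vis, q, ord) =
        (pvVisF vis row, q ++ pvAdds vis row, ord ++ pvAdds vis row) := by
  induction row with
  | nil => intro vis q ord; simp [pvVisF, pvAdds]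
  | cons i rest ih =>
      intro vis q ord
      by_cases h : i ∈ vis
      · simp [pvStepB, pvVisF, pvAdds, h, PySem.Set.add_of_mem, ih]
      · simp [pvStepB, pvVisF, pvAdds, h, ih, List.append_assoc]

-- the number of distinct flattened-adjacency values not yet visited
def pvCnt (S : List Int) (vis : PySem.Set Int) : Nat :=
  (S.toFinset \ vis.toFinset).card

theorem pvToFinsetAdd (vis : PySem.Set Int) (i : Int) :
    (PySem.Set.add vis i).toFinset = insert i vis.toFinset := by
  by_cases h : i ∈ vis
  · rw [PySem.Set.add_of_mem h, Finset.insert_eq_self.mpr (List.mem_toFinset.mpr h)]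
  · rw [PySem.Set.add_of_not_mem h]
    simp [List.toFinset_append]

theorem pvCntAdd (S : List Int) (vis : PySem.Set Int) (i : Int)
    (hi : i ∈ S) (hv : i ∉ vis) :
    pvCnt S (PySem.Set.add vis i) + 1 = pvCnt S vis := by
  unfold pvCnt
  rw [pvToFinsetAdd, Finset.sdiff_insert]
  have hmem : i ∈ S.toFinset \ vis.toFinset := by
    rw [Finset.mem_sdiff, List.mem_toFinset, List.mem_toFinset]
    exact ⟨hi, hv⟩
  rw [Finset.card_erase_of_mem hmem]
  have : 1 ≤ (S.toFinset \ vis.toFinset).card := Finset.card_pos.mpr ⟨i, hmem⟩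
  omega

theorem pvCntAddLe (S : List Int) (vis : PySem.Set Int) (i : Int) :
    pvCnt S (PySem.Set.add vis i) ≤ pvCnt S vis := by
  unfold pvCnt
  apply Finset.card_le_card
  rw [pvToFinsetAdd]
  intro x hx
  rw [Finset.mem_sdiff, Finset.mem_insert] at hx
  rw [Finset.mem_sdiff]
  exact ⟨hx.1, fun hm => hx.2 (Or.inr hm)⟩

theorem pvCntRow (S : List Int) (row : List Int) :
    ∀ (vis : PySem.Set Int), (∀ i ∈ row, i ∈ S) →
      (pvAdds vis row).length + pvCnt S (pvVisF vis row) ≤ pvCnt S vis := by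
  induction row with
  | nil => intro vis _; simp [pvAdds, pvVisF]
  | cons i rest ih =>
      intro vis hsub
      have hrest := fun j hj => hsub j (List.mem_cons_of_mem _ hj)
      by_cases h : i ∈ vis
      · have := ih vis hrest
        have hle := pvCntAddLe S vis i
        simp only [pvAdds, pvVisF, PySem.Set.add_of_mem h, List.foldl_cons] at this ⊢
        simp [h, this]
      · have hih := ih (PySem.Set.add vis i) hrest
        have hcnt := pvCntAdd S vis i (hsub i (List.mem_cons_self ..)) h
        have hc : ¬ (PySem.Set.contains vis i = true) :=
          fun hc => h ((PySem.Set.contains_iff vis i).mp hc)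
        simp only [pvAdds, pvVisF, List.foldl_cons, if_neg hc, List.length_cons] at hih ⊢
        omega

theorem pvRowSubset (graph : List (List Int)) (c : Int) :
    ∀ i ∈ PySem.List.pyGetD graph c [], i ∈ graph.flatten := by
  intro i hi
  rcases hrow : PySem.List.pyGet? graph c with _ | row
  · have h0 : PySem.List.pyGetD graph c ([] : List Int) = [] := by
      simp [PySem.List.pyGetD, hrow]
    rw [h0] at hi; cases hi
  · have hmem : row ∈ graph := PySem.List.mem_of_pyGet?_eq_some _ hrow
    have h0 : PySem.List.pyGetD graph c ([] : List Int) = row := by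
      simp [PySem.List.pyGetD, hrow]
    rw [h0] at hi
    exact List.mem_flatten.mpr ⟨row, hmem, hi⟩

theorem pvPass1Factor (graph : List (List Int)) :
    ∀ (fuel : Nat) (q : List Int) (vis : PySem.Set Int) (ord : List Int),
      pvPass1 graph fuel q vis ord = ord ++ pvPass1 graph fuel q vis [] := by
  intro fuel
  induction fuel with
  | zero => intro q vis ord; simp [pvPass1]
  | succ fuel ih =>
      intro q vis ord
      cases q with
      | nil => simp [pvPass1]
      | cons c q =>
          simp only [pvPass1, pvInnerB]
          rw [ih _ _ (ord ++ pvAdds vis _), ih _ _ ([] ++ pvAdds vis _)]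
          simp [List.append_assoc]

theorem pvMain (graph a : List (List Int)) :
    ∀ (fuel : Nat) (q : List Int) (vis : PySem.Set Int) (res : Int),
      q.length + pvCnt graph.flatten vis ≤ fuel →
      pvLoopA graph a fuel q vis res =
        (q ++ pvPass1 graph fuel q vis []).foldl (pvRowMax graph a) res := by
  intro fuel
  induction fuel with
  | zero =>
      intro q vis res hle
      have hq : q = [] := by
        cases q with
        | nil => rfl
        | cons c q => simp at hle
      subst hq
      simp [pvLoopA, pvPass1]
  | succ fuel ih =>
      intro q vis res hle
      cases q with
      | nil => simp [pvLoopA, pvPass1]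
      | cons c q =>
          have hrowmax : pvRowMax graph a res c =
              (PySem.List.pyGetD graph c []).foldl
                (fun r i => if r < pvVal a i then pvVal a i else r) res := rfl
          have hcnt := pvCntRow graph.flatten (PySem.List.pyGetD graph c []) vis
            (pvRowSubset graph c)
          have hle' : (q ++ pvAdds vis (PySem.List.pyGetD graph c [])).length +
              pvCnt graph.flatten (pvVisF vis (PySem.List.pyGetD graph c [])) ≤ fuel := by
            simp only [List.length_append, List.length_cons] at hle ⊢
            omega
          simp only [pvLoopA, pvPass1, pvInnerA, pvInnerB]
          rw [ih _ _ _ hle']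
          simp only [List.nil_append]
          rw [pvPass1Factor graph fuel _ _ (pvAdds vis _)]
          simp [hrowmax, List.foldl_append, List.append_assoc]

theorem pvCntLe (S : List Int) (vis : PySem.Set Int) : pvCnt S vis ≤ S.length := by
  unfold pvCnt
  calc (S.toFinset \ vis.toFinset).card ≤ S.toFinset.card :=
        Finset.card_le_card (Finset.sdiff_subset)
    _ ≤ S.length := S.toFinset_card_le

-- ===== VERDICT (by name: the statement is the Claim_ definition above) =====
theorem bfs_spec : Claim_equal_bfs := by
  intro graph start a visited _ _
  unfold Spec_bfs bfs bfs_alt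
  have hle : (([start] : List Int)).length + pvCnt graph.flatten visited ≤
      graph.flatten.length + 1 := by
    have := pvCntLe graph.flatten visited
    simp only [List.length_cons, List.length_nil]
    omega
  rw [pvMain graph a (graph.flatten.length + 1) [start] visited (-2 * 10 ^ 9) hle]
  rw [pvPass1Factor graph (graph.flatten.length + 1) [start] visited [start]]
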